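-- pv_equiv track=rewrite | github.com/leon-matthews/animal3 | animal3/utils/algorithms.py | lstrip_iterable
-- ===== SOURCE A (Python) =====
-- from typing import (
--     Any, Dict, Iterable, List, Optional, Sequence, Tuple, TypeVar,
-- )
--
-- def lstrip_iterable(original: Iterable[Any]) -> List[Any]:
--     """
--     Build a new list with leading None values removed.
--
--         >>> lstrip_iterable([None, None, 1, None, 2, None])
--         [1, None, 2, None]
--
--     Args:
--         original:
--             List, tuple, or any iterable.
--
--     Returns:
--         List of values.
--     """
--     output = []
--     should_output = False
--     for value in original:
--         if value is not None:
--             should_output = True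
--         if should_output:
--             output.append(value)
--     return output
-- ===== SOURCE B (Python) =====
-- def lstrip_iterable(original):
--     items = list(original)
--     for i, value in enumerate(items):
--         if value is not None:
--             return items[i:]
--     return []
-- ===== Notes on version B (the rewrite author's own statement) =====
-- stated objective: idiomatic
-- what changed: Replaces the per-element boolean-flag accumulation loop with a find-first-non-None-index-then-slice: once the boundary is found the tail is returned as one slice instead of element-by-element appends.
import Mathlib
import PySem

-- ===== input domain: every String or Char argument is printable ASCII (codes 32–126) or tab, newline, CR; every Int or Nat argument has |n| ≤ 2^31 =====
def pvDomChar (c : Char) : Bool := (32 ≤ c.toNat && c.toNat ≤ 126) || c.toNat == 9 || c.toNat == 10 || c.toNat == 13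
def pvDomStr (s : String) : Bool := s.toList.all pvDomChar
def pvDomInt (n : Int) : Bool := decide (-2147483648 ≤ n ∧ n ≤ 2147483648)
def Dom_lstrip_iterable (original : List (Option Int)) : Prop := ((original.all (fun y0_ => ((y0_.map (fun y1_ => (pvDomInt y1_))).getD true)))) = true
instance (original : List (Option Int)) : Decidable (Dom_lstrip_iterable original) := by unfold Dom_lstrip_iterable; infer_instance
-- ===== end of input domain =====

-- B replaces A's boolean-flag accumulation loop with a find-first-index-then-slice (idiomatic, same cost).


-- ===== PORT A =====
-- loop state: (output, should_output); per element the flag is updated first, then conditionally appended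
def lstripStep (st : List (Option Int) × Bool) (value : Option Int) : List (Option Int) × Bool :=
  let should := if value ≠ none then true else st.2
  (if should then st.1 ++ [value] else st.1, should)

def lstrip_iterable (original : List (Option Int)) : List (Option Int) :=
  (original.foldl lstripStep ([], false)).1

-- ===== PORT B =====
-- find the first non-None index, return the slice from there; [] if none exists
def lstrip_iterable_alt (original : List (Option Int)) : List (Option Int) :=
  match original.findIdx? (fun v => v.isSome) with
  | some i => original.drop i
  | none => []

-- ===== PRECONDITION & SPEC =====
def Spec_lstrip_iterable (original : List (Option Int)) (out : List (Option Int)) : Prop := out = lstrip_iterable_alt original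
instance (original : List (Option Int)) (out : List (Option Int)) : Decidable (Spec_lstrip_iterable original out) := by unfold Spec_lstrip_iterable; infer_instance

-- ===== CLAIM (what is proved, stated in full; the proofs are below) =====
def Claim_equal_lstrip_iterable : Prop := ∀ (original : List (Option Int)), Dom_lstrip_iterable original → Spec_lstrip_iterable original (lstrip_iterable original)

-- ===== LEMMAS AND PROOFS =====

theorem lstripStep_true (out : List (Option Int)) (v : Option Int) :
    lstripStep (out, true) v = (out ++ [v], true) := by
  cases v <;> simp [lstripStep]

theorem lstripStep_false_none (out : List (Option Int)) :
    lstripStep (out, false) none = (out, false) := by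
  simp [lstripStep]

theorem lstripStep_false_some (out : List (Option Int)) (x : Int) :
    lstripStep (out, false) (some x) = (out ++ [some x], true) := by
  simp [lstripStep]

-- once the flag is true, the loop appends every remaining element
theorem lstrip_foldl_true (l : List (Option Int)) (out : List (Option Int)) :
    (l.foldl lstripStep (out, true)).1 = out ++ l := by
  induction l generalizing out with
  | nil => simp
  | cons h t ih => rw [List.foldl_cons, lstripStep_true, ih]; simp

theorem lstrip_main (l : List (Option Int)) :
    lstrip_iterable l = lstrip_iterable_alt l := by
  induction l with
  | nil => rfl
  | cons h t ih =>
    cases h with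
    | none =>
      unfold lstrip_iterable lstrip_iterable_alt at ih ⊢
      rw [List.foldl_cons, lstripStep_false_none, ih]
      cases hf : t.findIdx? (fun v => v.isSome) <;>
        simp [List.findIdx?_cons, hf]
    | some x =>
      unfold lstrip_iterable lstrip_iterable_alt
      rw [List.foldl_cons, lstripStep_false_some, lstrip_foldl_true]
      simp [List.findIdx?_cons]

-- ===== VERDICT (by name: the statement is the Claim_ definition above) =====
theorem lstrip_iterable_spec : Claim_equal_lstrip_iterable := by
  intro original _
  exact lstrip_main original
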